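-- pv_equiv track=rewrite | github.com/Rinku2002/Timepass | Sudoko.py | solve_possible_array
-- ===== SOURCE A (Python) =====
-- def solve_possible_array(possible_array_group, possible_array):
--     all_elements = []
--     for elements in possible_array_group:
--         all_elements += elements
--     all_elements.sort()
--     all_elements.append("random_value")
--     for i in range(1, len(all_elements)-1):
--         if (
--             all_elements[i] != all_elements[i+1] and
--             all_elements[i] != all_elements[i-1] and
--             all_elements[i] in possible_array
--         ):
--             return all_elements[i]
--     return None
-- ===== SOURCE B (Python) =====
-- def solve_possible_array(possible_array_group, possible_array):
--     cnt = {}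
--     for row in possible_array_group:
--         for x in row:
--             cnt[x] = cnt.get(x, 0) + 1
--     if not cnt:
--         return None
--     m = min(cnt)
--     s = set(possible_array)
--     best = None
--     for v, c in cnt.items():
--         if c == 1 and v != m and v in s and (best is None or v < best):
--             best = v
--     return best
-- ===== Notes on version B (the rewrite author's own statement) =====
-- stated objective: alternative
-- what changed: replaces concatenate-sort-and-scan-with-sentinel by a single-pass dict counter: B counts occurrences once, takes the minimum key as the excluded global minimum, and keeps the smallest counted value that is unique and lies in possible_array; intended as the O(n) variant of A's O(n log n) sort, measured only ~1.5x at the largest size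
import Mathlib
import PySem

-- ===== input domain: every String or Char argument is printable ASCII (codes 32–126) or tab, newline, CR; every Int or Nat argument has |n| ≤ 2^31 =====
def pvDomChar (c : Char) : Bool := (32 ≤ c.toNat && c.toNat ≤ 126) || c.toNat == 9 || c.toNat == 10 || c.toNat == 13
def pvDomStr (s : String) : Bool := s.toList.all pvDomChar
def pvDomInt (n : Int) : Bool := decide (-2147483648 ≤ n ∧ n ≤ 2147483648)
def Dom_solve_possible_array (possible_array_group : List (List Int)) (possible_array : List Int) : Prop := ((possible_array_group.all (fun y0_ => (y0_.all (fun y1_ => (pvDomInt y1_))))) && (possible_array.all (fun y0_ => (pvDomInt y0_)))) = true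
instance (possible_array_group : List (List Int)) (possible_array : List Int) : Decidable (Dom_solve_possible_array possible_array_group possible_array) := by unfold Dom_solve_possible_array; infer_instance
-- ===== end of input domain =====

-- B replaces A's concatenate+sort+neighbour-scan by a one-pass counter dict over the same values (objective: alternative).

-- ===== PORT A =====
-- A's scan 'for i in range(1, len(all_elements)-1)' runs over indices 1..n-1 of the n sorted
-- real elements (the appended string sentinel "random_value" sits at index n and compares
-- unequal to every int, which is exactly what 'a[i+1]? != some a[i]' gives at i = n-1:
-- the out-of-range lookup is none, hence unequal).
def goA (a : List Int) (pa : List Int) (i : Nat) : Option Int :=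
  if h : i < a.length then
    let x := a[i]
    if (a[i+1]? != some x) && (a[i-1]? != some x) && pa.contains x then some x
    else goA a pa (i+1)
  else none
termination_by a.length - i

def solve_possible_array (possible_array_group : List (List Int)) (possible_array : List Int) : Option Int :=
  let all_elements := PySem.List.sorted (possible_array_group.foldl (fun acc e => acc ++ e) []) (fun x => x) false
  goA all_elements possible_array 1

-- ===== PORT B =====
def solve_possible_array_alt (possible_array_group : List (List Int)) (possible_array : List Int) : Option Int :=
  let cnt : PySem.Dict Int Int := possible_array_group.foldl
    (fun d row => row.foldl (fun d x => d.insert x (d.getD x 0 + 1)) d) PySem.Dict.empty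
  match PySem.List.min? cnt.keys (fun x => x) with
  | none => none   -- 'if not cnt: return None'
  | some m =>
    let s := PySem.Set.ofList possible_array
    cnt.items.foldl
      (fun best p =>
        if (p.2 == (1 : Int)) && (p.1 != m) && s.contains p.1 &&
           (match best with | none => true | some b => decide (p.1 < b))
        then some p.1 else best) none

-- ===== PRECONDITION & SPEC =====
def Spec_solve_possible_array (possible_array_group : List (List Int)) (possible_array : List Int) (out : Option Int) : Prop := out = solve_possible_array_alt possible_array_group possible_array
instance (possible_array_group : List (List Int)) (possible_array : List Int) (out : Option Int) : Decidable (Spec_solve_possible_array possible_array_group possible_array out) := by unfold Spec_solve_possible_array; infer_instance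

-- ===== CLAIM (what is proved, stated in full; the proofs are below) =====
def Claim_equal_solve_possible_array : Prop := ∀ (possible_array_group : List (List Int)) (possible_array : List Int), Dom_solve_possible_array possible_array_group possible_array → Spec_solve_possible_array possible_array_group possible_array (solve_possible_array possible_array_group possible_array)

-- ===== LEMMAS AND PROOFS =====

-- B's running minimum step ('best is None or v < best').
def minStep (best : Option Int) (v : Int) : Option Int :=
  if (match best with | none => true | some b => decide (v < b)) then some v else best

-- The filter B applies to the counted values (count 1, not the global minimum, allowed).
def qB (ns : List Int) (pa : List Int) (m : Int) (k : Int) : Bool :=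
  (((ns.count k : Int)) == 1) && (k != m) && (PySem.Set.ofList pa).contains k

-- A's loop-body test at index j of the sorted list (none for j out of range).
def condAt (S : List Int) (pa : List Int) (j : Nat) : Bool :=
  match S[j]? with
  | none => false
  | some x => (S[j+1]? != some x) && (S[j-1]? != some x) && pa.contains x

lemma minStep_some (b v : Int) : minStep (some b) v = some (min b v) := by
  by_cases h : v < b <;> simp [minStep, h, min_def]


lemma foldl_minStep_some (L : List Int) (b : Int) :
    L.foldl minStep (some b) = some (L.foldl min b) := by
  induction L generalizing b with
  | nil => rfl
  | cons v t ih => simp only [List.foldl_cons, minStep_some, ih]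

lemma foldl_minStep_none (L : List Int) :
    L.foldl minStep none = PySem.List.min? L (fun x => x) := by
  cases L with
  | nil => rfl
  | cons v t =>
      have h0 : minStep none v = some v := rfl
      simp only [List.foldl_cons, h0, foldl_minStep_some, PySem.List.min?_id_cons]

-- B's result in closed form: None for empty input, else the first minimum of the filtered keys.
lemma alt_eq (g : List (List Int)) (pa : List Int) :
    solve_possible_array_alt g pa =
      match PySem.List.min? (PySem.Set.ofList g.flatten) (fun x => x) with
      | none => none
      | some m => PySem.List.min? ((PySem.Set.ofList g.flatten).filter (qB g.flatten pa m)) (fun x => x) := by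
  unfold solve_possible_array_alt
  simp only [← List.foldl_flatten, PySem.Dict.foldl_insert_getD_add_one_eq_counter,
      PySem.Dict.keys_counter]
  cases hmin : PySem.List.min? (PySem.Set.ofList g.flatten) (fun x => x) with
  | none => rfl
  | some m =>
      simp only [PySem.Dict.items_counter, List.foldl_map]
      have hbody : ∀ (best : Option Int) (k : Int),
          (if (((g.flatten.count k : Int)) == 1) && (k != m) && (PySem.Set.ofList pa).contains k &&
              (match best with | none => true | some b => decide (k < b))
           then some k else best)
          = if qB g.flatten pa m k then minStep best k else best := by
        intro best k
        show (if (qB g.flatten pa m k &&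
              (match best with | none => true | some b => decide (k < b))) = true
            then some k else best)
          = if qB g.flatten pa m k then minStep best k else best
        cases hqb : qB g.flatten pa m k <;> cases best <;> simp [minStep]
      simp only [hbody]
      rw [PySem.List.foldl_if_eq_foldl_filter, foldl_minStep_none]


lemma condAt_of_lt (S pa : List Int) (i : Nat) (h : i < S.length) :
    condAt S pa i = ((S[i+1]? != some S[i]) && (S[i-1]? != some S[i]) && pa.contains S[i]) := by
  unfold condAt
  rw [List.getElem?_eq_getElem h]

lemma condAt_of_ge (S pa : List Int) (i : Nat) (h : S.length ≤ i) :
    condAt S pa i = false := by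
  unfold condAt
  rw [List.getElem?_eq_none h]

-- A's loop-body test holds at an in-range index j ≥ 1 of the sorted list exactly when the
-- element there occurs once, is not the minimum (= the element at index 0) and is allowed.
lemma condAt_iff (S pa : List Int)
    (hmono : ∀ (p q : Nat) (hp : p < S.length) (hq : q < S.length), p ≤ q → S[p] ≤ S[q])
    (j : Nat) (hj1 : 1 ≤ j) (hj : j < S.length) :
    condAt S pa j = true ↔
      (S.count (S[j]) = 1 ∧ S[j] ≠ S[0]'(by omega) ∧ S[j] ∈ pa) := by
  have h0 : 0 < S.length := by omega
  have hjm : j - 1 < S.length := by omega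
  rw [condAt_of_lt S pa j hj]
  simp only [Bool.and_eq_true, bne_iff_ne, ne_eq, List.contains_iff_mem]
  constructor
  · rintro ⟨⟨hnext, hprev⟩, hmem⟩
    rw [List.getElem?_eq_getElem hjm] at hprev
    have hprev' : S[j-1] ≠ S[j] := fun he => hprev (by rw [he])
    have hlt : S[j-1] < S[j] := lt_of_le_of_ne (hmono (j-1) j hjm hj (by omega)) hprev'
    refine ⟨?_, ?_, hmem⟩
    · have hsplit : ∀ x : Int, S.count x = (S.take j).count x + (S.drop j).count x := by
        intro x
        conv_lhs => rw [← List.take_append_drop j S]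
        rw [List.count_append]
      have htake : (S.take j).count S[j] = 0 := by
        rw [List.count_eq_zero]
        intro hmem'
        obtain ⟨k, hk, hke⟩ := List.mem_iff_getElem.mp hmem'
        have hkj : k < j := by
          have := hk; simp [List.length_take] at this; omega
        rw [List.getElem_take] at hke
        have hle : S[k]'(by omega) ≤ S[j-1] := hmono k (j-1) (by omega) hjm (by omega)
        rw [hke] at hle
        omega
      have hdropeq : S.drop j = S[j] :: S.drop (j+1) := List.drop_eq_getElem_cons hj
      have hdrop1 : (S.drop (j+1)).count S[j] = 0 := by
        rw [List.count_eq_zero]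
        intro hmem'
        obtain ⟨k, hk, hke⟩ := List.mem_iff_getElem.mp hmem'
        have hklen : j + 1 + k < S.length := by
          have := hk; simp [List.length_drop] at this; omega
        rw [List.getElem_drop] at hke
        have hn1 : j + 1 < S.length := by omega
        rw [List.getElem?_eq_getElem hn1] at hnext
        have hge : S[j+1] ≤ S[j+1+k]'hklen := hmono (j+1) (j+1+k) hn1 hklen (by omega)
        have hle2 : S[j] ≤ S[j+1] := hmono j (j+1) hj hn1 (by omega)
        have : S[j+1] = S[j] := by omega
        exact hnext (by rw [this])
      have hd : List.count S[j] (S.drop j) = 1 := by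
        rw [hdropeq, List.count_cons]
        simp [hdrop1]
      rw [hsplit, htake, hd]
    · have h01 : S[0]'h0 ≤ S[j-1] := hmono 0 (j-1) h0 hjm (by omega)
      intro he
      omega
  · rintro ⟨hcount, hne0, hmem⟩
    refine ⟨⟨?_, ?_⟩, hmem⟩
    · -- next neighbour differs (or is out of range)
      intro hEq
      by_cases hn : j + 1 < S.length
      · rw [List.getElem?_eq_getElem hn] at hEq
        have hval : S[j+1] = S[j] := by injection hEq
        have h2 : 2 ≤ S.count S[j] := by
          have hsplit : ∀ x : Int, S.count x = (S.take (j+1)).count x + (S.drop (j+1)).count x := by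
            intro x
            conv_lhs => rw [← List.take_append_drop (j+1) S]
            rw [List.count_append]
          have m1 : S[j] ∈ S.take (j+1) := by
            refine List.mem_iff_getElem.mpr ⟨j, ?_, ?_⟩
            · simp [List.length_take]; omega
            · rw [List.getElem_take]
          have m2 : S[j] ∈ S.drop (j+1) := by
            refine List.mem_iff_getElem.mpr ⟨0, ?_, ?_⟩
            · simp [List.length_drop]; omega
            · rw [List.getElem_drop]
              simpa using hval
          have c1 : 1 ≤ (S.take (j+1)).count S[j] := List.count_pos_iff.mpr m1
          have c2 : 1 ≤ (S.drop (j+1)).count S[j] := List.count_pos_iff.mpr m2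
          have := hsplit S[j]
          omega
        omega
      · rw [List.getElem?_eq_none (by omega)] at hEq
        simp at hEq
    · -- previous neighbour differs
      intro hEq
      rw [List.getElem?_eq_getElem hjm] at hEq
      have hval : S[j-1] = S[j] := by injection hEq
      have h2 : 2 ≤ S.count S[j] := by
        have hsplit : ∀ x : Int, S.count x = (S.take j).count x + (S.drop j).count x := by
          intro x
          conv_lhs => rw [← List.take_append_drop j S]
          rw [List.count_append]
        have m1 : S[j] ∈ S.take j := by
          refine List.mem_iff_getElem.mpr ⟨j - 1, ?_, ?_⟩
          · simp [List.length_take]; omega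
          · rw [List.getElem_take]; exact hval
        have m2 : S[j] ∈ S.drop j := by
          refine List.mem_iff_getElem.mpr ⟨0, ?_, ?_⟩
          · simp [List.length_drop]; omega
          · rw [List.getElem_drop]; simp
        have c1 : 1 ≤ (S.take j).count S[j] := List.count_pos_iff.mpr m1
        have c2 : 1 ≤ (S.drop j).count S[j] := List.count_pos_iff.mpr m2
        have := hsplit S[j]
        omega
      omega

lemma goA_none_iff_aux (S pa : List Int) (fuel : Nat) :
    ∀ i, S.length - i ≤ fuel →
      (goA S pa i = none ↔ ∀ j, i ≤ j → condAt S pa j = false) := by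
  induction fuel with
  | zero =>
      intro i hle
      have hi : S.length ≤ i := by omega
      rw [goA]
      rw [dif_neg (by omega)]
      simp only [true_iff]
      intro j hj
      exact condAt_of_ge S pa j (by omega)
  | succ fuel ih =>
      intro i hle
      by_cases hi : i < S.length
      · rw [goA, dif_pos hi]
        have hcond : condAt S pa i =
            ((S[i+1]? != some (S[i]'hi)) && (S[i-1]? != some (S[i]'hi)) && pa.contains (S[i]'hi)) :=
          condAt_of_lt S pa i hi
        cases hc : condAt S pa i with
        | true =>
            rw [hcond] at hc
            rw [if_pos hc]
            constructor
            · intro h; simp at h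
            · intro h
              have := h i (le_refl i)
              rw [← hcond] at hc
              rw [this] at hc
              exact Bool.noConfusion hc
        | false =>
            rw [hcond] at hc
            rw [if_neg (by rw [hc]; exact Bool.false_ne_true)]
            rw [ih (i+1) (by omega)]
            constructor
            · intro h j hj
              rcases Nat.eq_or_lt_of_le hj with rfl | hlt
              · rw [← hcond] at hc; exact hc
              · exact h j hlt
            · intro h j hj
              exact h j (by omega)
      · rw [goA, dif_neg hi]
        simp only [true_iff]
        intro j hj
        exact condAt_of_ge S pa j (by omega)

lemma goA_eq_some_aux (S pa : List Int) (fuel : Nat) :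
    ∀ i, S.length - i ≤ fuel → ∀ x, goA S pa i = some x →
      ∃ j, i ≤ j ∧ ∃ h : j < S.length, S[j] = x ∧ condAt S pa j = true ∧
        ∀ k, i ≤ k → k < j → condAt S pa k = false := by
  induction fuel with
  | zero =>
      intro i hle x hx
      rw [goA, dif_neg (by omega)] at hx
      simp at hx
  | succ fuel ih =>
      intro i hle x hx
      by_cases hi : i < S.length
      · rw [goA, dif_pos hi] at hx
        have hcond : condAt S pa i =
            ((S[i+1]? != some (S[i]'hi)) && (S[i-1]? != some (S[i]'hi)) && pa.contains (S[i]'hi)) :=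
          condAt_of_lt S pa i hi
        cases hc : condAt S pa i with
        | true =>
            rw [hcond] at hc
            rw [if_pos hc] at hx
            refine ⟨i, le_refl i, hi, ?_, ?_, ?_⟩
            · exact Option.some.inj hx
            · rw [hcond]; exact hc
            · intro k hk hk'; omega
        | false =>
            rw [hcond] at hc
            rw [if_neg (by rw [hc]; exact Bool.false_ne_true)] at hx
            obtain ⟨j, hij, hjlt, hje, hjc, hmin2⟩ := ih (i+1) (by omega) x hx
            refine ⟨j, by omega, hjlt, hje, hjc, ?_⟩
            intro k hk hk'
            rcases Nat.eq_or_lt_of_le hk with rfl | hlt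
            · rw [← hcond] at hc; exact hc
            · exact hmin2 k hlt hk'
      · rw [goA, dif_neg hi] at hx
        simp at hx


-- min(cnt) in B is the head of the sorted list A scans.
lemma min_ofList_eq (ns : List Int)
    (h0 : 0 < (PySem.List.sorted ns (fun x => x) false).length) :
    PySem.List.min? (PySem.Set.ofList ns) (fun x => x)
      = some ((PySem.List.sorted ns (fun x => x) false)[0]) := by
  have hperm := PySem.List.sorted_perm ns (fun x => x) false
  have hm0 : (PySem.List.sorted ns (fun x => x) false)[0] ∈ ns :=
    hperm.mem_iff.mp (List.getElem_mem h0)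
  cases e : PySem.List.min? (PySem.Set.ofList ns) (fun x => x) with
  | none =>
      have hnil : PySem.Set.ofList ns = [] := (PySem.List.min?_eq_none_iff _ _).mp e
      have hmm : (PySem.List.sorted ns (fun x => x) false)[0] ∈ PySem.Set.ofList ns :=
        (PySem.Set.mem_ofList _ _).mpr hm0
      rw [hnil] at hmm
      simp at hmm
  | some k =>
      have hk1 : k ∈ ns := (PySem.Set.mem_ofList _ _).mp (PySem.List.min?_mem e)
      have hk2 : k ≤ (PySem.List.sorted ns (fun x => x) false)[0] :=
        PySem.List.min?_isMin e _ ((PySem.Set.mem_ofList _ _).mpr hm0)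
      have hkS : k ∈ PySem.List.sorted ns (fun x => x) false := hperm.mem_iff.mpr hk1
      obtain ⟨idx, hidx, hidxe⟩ := List.mem_iff_getElem.mp hkS
      have hle : (PySem.List.sorted ns (fun x => x) false)[0] ≤ k := by
        rw [← hidxe]
        exact PySem.List.sorted_id_getElem_mono ns (Nat.zero_le idx) hidx
      rw [le_antisymm hk2 hle]


lemma main_eq (g : List (List Int)) (pa : List Int) :
    solve_possible_array g pa = solve_possible_array_alt g pa := by
  rw [alt_eq]
  unfold solve_possible_array
  rw [PySem.List.foldl_append_eq_flatten, List.nil_append]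
  by_cases hne : g.flatten = []
  · rw [hne]
    rw [goA]
    simp [PySem.List.min?]
  · have h0 : 0 < (PySem.List.sorted g.flatten (fun x => x) false).length := by
      rw [PySem.List.length_sorted]
      exact List.length_pos_iff.mpr hne
    rw [min_ofList_eq g.flatten h0]
    change goA (PySem.List.sorted g.flatten (fun x => x) false) pa 1
      = PySem.List.min? ((PySem.Set.ofList g.flatten).filter
          (qB g.flatten pa ((PySem.List.sorted g.flatten (fun x => x) false)[0]'h0)))
          (fun x => x)
    have hmono : ∀ (p q : Nat) (hp : p < (PySem.List.sorted g.flatten (fun x => x) false).length)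
        (hq : q < (PySem.List.sorted g.flatten (fun x => x) false).length), p ≤ q →
        (PySem.List.sorted g.flatten (fun x => x) false)[p] ≤
        (PySem.List.sorted g.flatten (fun x => x) false)[q] := by
      intro p q hp hq hpq
      exact PySem.List.sorted_id_getElem_mono g.flatten hpq hq
    have hperm := PySem.List.sorted_perm g.flatten (fun x => x) false
    -- membership in B's filtered key list, in arithmetic form
    have hCmem : ∀ y : Int,
        y ∈ (PySem.Set.ofList g.flatten).filter
              (qB g.flatten pa ((PySem.List.sorted g.flatten (fun x => x) false)[0])) ↔
          (g.flatten.count y = 1 ∧ y ≠ (PySem.List.sorted g.flatten (fun x => x) false)[0] ∧ y ∈ pa) := by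
      intro y
      rw [List.mem_filter, PySem.Set.mem_ofList]
      unfold qB
      simp only [Bool.and_eq_true, beq_iff_eq, bne_iff_ne, ne_eq, PySem.Set.contains, List.contains_iff_mem]
      constructor
      · rintro ⟨-, ⟨⟨hc, hm⟩, hp⟩⟩
        exact ⟨by exact_mod_cast hc, hm, (PySem.Set.mem_ofList pa y).mp hp⟩
      · rintro ⟨hc, hm, hp⟩
        exact ⟨List.count_pos_iff.mp (by omega),
          ⟨⟨by exact_mod_cast hc, hm⟩, (PySem.Set.mem_ofList pa y).mpr hp⟩⟩
    -- every such value sits at a qualifying index ≥ 1 of the sorted list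
    have hidx : ∀ y : Int,
        (g.flatten.count y = 1 ∧ y ≠ (PySem.List.sorted g.flatten (fun x => x) false)[0] ∧ y ∈ pa) →
        ∃ j, 1 ≤ j ∧ ∃ h : j < (PySem.List.sorted g.flatten (fun x => x) false).length,
          (PySem.List.sorted g.flatten (fun x => x) false)[j] = y ∧
          condAt (PySem.List.sorted g.flatten (fun x => x) false) pa j = true := by
      rintro y ⟨hc, hne0, hmem⟩
      have hyS : y ∈ PySem.List.sorted g.flatten (fun x => x) false :=
        hperm.mem_iff.mpr (List.count_pos_iff.mp (by omega))
      obtain ⟨j, hj, hje⟩ := List.mem_iff_getElem.mp hyS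
      have hj1 : 1 ≤ j := by
        rcases Nat.eq_zero_or_pos j with rfl | h
        · exact absurd hje.symm hne0
        · exact h
      refine ⟨j, hj1, hj, hje, ?_⟩
      rw [condAt_iff (PySem.List.sorted g.flatten (fun x => x) false) pa hmono j hj1 hj]
      refine ⟨?_, ?_, ?_⟩
      · rw [hje, hperm.count_eq]; exact hc
      · rw [hje]; exact hne0
      · rw [hje]; exact hmem
    cases r : goA (PySem.List.sorted g.flatten (fun x => x) false) pa 1 with
    | none =>
        have hall := (goA_none_iff_aux (PySem.List.sorted g.flatten (fun x => x) false) pa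
          (PySem.List.sorted g.flatten (fun x => x) false).length 1 (by omega)).mp r
        have hCnil : (PySem.Set.ofList g.flatten).filter
            (qB g.flatten pa ((PySem.List.sorted g.flatten (fun x => x) false)[0])) = [] := by
          rw [List.eq_nil_iff_forall_not_mem]
          intro y hy
          obtain ⟨j, hj1, hj, hje, hcnd⟩ := hidx y ((hCmem y).mp hy)
          rw [hall j hj1] at hcnd
          exact Bool.noConfusion hcnd
        rw [hCnil]
        exact ((PySem.List.min?_eq_none_iff _ _).mpr rfl).symm
    | some x =>
        obtain ⟨j, hij, hjlt, hje, hjc, hfirst⟩ := goA_eq_some_aux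
          (PySem.List.sorted g.flatten (fun x => x) false) pa
          (PySem.List.sorted g.flatten (fun x => x) false).length 1 (by omega) x r
        have hxconds := (condAt_iff (PySem.List.sorted g.flatten (fun x => x) false) pa
          hmono j hij hjlt).mp hjc
        have hxc' : g.flatten.count x = 1 ∧
            x ≠ (PySem.List.sorted g.flatten (fun x => x) false)[0] ∧ x ∈ pa := by
          rw [← hje]
          exact ⟨by rw [← hperm.count_eq]; exact hxconds.1, hxconds.2.1, hxconds.2.2⟩
        have hxC := (hCmem x).mpr hxc'
        have hminx : ∀ y ∈ (PySem.Set.ofList g.flatten).filter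
            (qB g.flatten pa ((PySem.List.sorted g.flatten (fun x => x) false)[0])),
            x ≤ y := by
          intro y hy
          obtain ⟨k, hk1, hk, hke, hkc⟩ := hidx y ((hCmem y).mp hy)
          have hjk : j ≤ k := by
            by_contra hcon
            push Not at hcon
            rw [hfirst k hk1 hcon] at hkc
            exact Bool.noConfusion hkc
          rw [← hje, ← hke]
          exact hmono j k hjlt hk hjk
        cases e : PySem.List.min? ((PySem.Set.ofList g.flatten).filter
            (qB g.flatten pa ((PySem.List.sorted g.flatten (fun x => x) false)[0])))
            (fun x => x) with
        | none =>
            have hnil := (PySem.List.min?_eq_none_iff _ _).mp e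
            rw [hnil] at hxC
            simp at hxC
        | some z =>
            have hz1 := PySem.List.min?_mem e
            have hz2 : z ≤ x := PySem.List.min?_isMin e x hxC
            rw [le_antisymm (hminx z hz1) hz2]

-- ===== VERDICT (by name: the statement is the Claim_ definition above) =====
theorem solve_possible_array_spec : Claim_equal_solve_possible_array := by
  intro g pa _
  unfold Spec_solve_possible_array
  exact main_eq g pa
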